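-- pv_equiv track=rewrite | github.com/katarzynaadamczyk/AoC | 2021/Day_15/task1_4.py | checkonx
-- ===== SOURCE A (Python) =====
-- def checkonx(data, result, x, y):
--     if y < len(data) - 1:
--         tmp = []
--         for i in range(max(0, x - 8), min(x, len(data[y]))):
--             act = result[i] + data[y+1][i]
--             for j in range(i + 1, min(x+1, len(data[y]))):
--                 act += data[y+1][j]
--             tmp.append(act)
--         return (min(tmp)) if len(tmp) > 0 else -1
--     else:
--         return -1
-- ===== SOURCE B (Python) =====
-- def checkonx(data, result, x, y):
--     if y >= len(data) - 1:
--         return -1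
--     nxt = data[y + 1]
--     lo = max(0, x - 8)
--     hi = min(x, len(data[y]))
--     upper = min(x + 1, len(data[y]))
--     if lo >= hi:
--         return -1
--     # suf[k] = sum of nxt[lo+k .. upper-1], built in one right-to-left pass
--     suf = [0]
--     for i in range(upper - 1, lo - 1, -1):
--         suf.insert(0, suf[0] + nxt[i])
--     best = None
--     for i in range(lo, hi):
--         v = result[i] + suf[i - lo]
--         if best is None or v < best:
--             best = v
--     return best
-- ===== Notes on version B (the rewrite author's own statement) =====
-- stated objective: alternative
-- what changed: Replaces the nested loop that re-sums data[y+1][i..] for every window position by one right-to-left suffix-sum pass over data[y+1] followed by a single running-minimum scan of the window; the window is capped at 9 elements, so the cost is comparable.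
import Mathlib
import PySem

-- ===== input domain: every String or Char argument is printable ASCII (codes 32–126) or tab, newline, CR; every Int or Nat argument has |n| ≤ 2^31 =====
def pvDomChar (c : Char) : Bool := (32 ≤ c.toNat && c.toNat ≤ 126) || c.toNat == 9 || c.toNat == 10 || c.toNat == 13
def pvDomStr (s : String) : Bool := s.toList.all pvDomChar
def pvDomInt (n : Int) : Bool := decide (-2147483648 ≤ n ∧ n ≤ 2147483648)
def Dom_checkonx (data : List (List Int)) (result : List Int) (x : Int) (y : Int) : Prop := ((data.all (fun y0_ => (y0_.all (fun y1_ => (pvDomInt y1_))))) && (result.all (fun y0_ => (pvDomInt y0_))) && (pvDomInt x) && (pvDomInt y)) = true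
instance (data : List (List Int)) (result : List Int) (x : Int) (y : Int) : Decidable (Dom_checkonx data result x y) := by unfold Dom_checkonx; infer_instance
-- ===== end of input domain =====

-- B replaces A's nested re-summation of data[y+1][i..] by one right-to-left suffix-sum
-- pass followed by a single running-minimum scan (objective: alternative; the window is
-- capped at 9 elements, so the cost is comparable).

-- ===== PORT A =====
-- literal port of A: for each i in [max(0,x-8), min(x,len(data[y]))) build
-- act = result[i] + data[y+1][i] + sum_{j=i+1}^{min(x+1,len(data[y]))-1} data[y+1][j], append to tmp, return min(tmp) or -1
def checkonx (data : List (List Int)) (result : List Int) (x : Int) (y : Int) : Int :=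
  if y < (data.length : Int) - 1 then
    let row := (PySem.List.pyGet? data y).getD []
    let nxt := (PySem.List.pyGet? data (y + 1)).getD []
    let tmp := (PySem.List.pyRange (max 0 (x - 8)) (min x (row.length : Int)) 1).foldl
      (fun tmp i =>
        tmp ++ [(PySem.List.pyRange (i + 1) (min (x + 1) (row.length : Int)) 1).foldl
                  (fun act j => act + PySem.List.pyGetD nxt j 0)
                  (PySem.List.pyGetD result i 0 + PySem.List.pyGetD nxt i 0)]) []
    if 0 < (tmp.length : Int) then (PySem.List.min? tmp (fun v => v)).getD 0 else -1
  else -1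

-- ===== PORT B =====
-- literal port of Source B: suffix-sum list built right-to-left by consing, then one running-minimum pass
def checkonx_alt (data : List (List Int)) (result : List Int) (x : Int) (y : Int) : Int :=
  if y ≥ (data.length : Int) - 1 then -1
  else
    let nxt := (PySem.List.pyGet? data (y + 1)).getD []
    let lo := max 0 (x - 8)
    let hi := min x ((((PySem.List.pyGet? data y).getD []).length : Int))
    let upper := min (x + 1) ((((PySem.List.pyGet? data y).getD []).length : Int))
    if lo ≥ hi then -1
    else
      let suf := (PySem.List.pyRange (upper - 1) (lo - 1) (-1)).foldl
        (fun suf i => (suf.headD 0 + PySem.List.pyGetD nxt i 0) :: suf) [0]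
      let best := (PySem.List.pyRange lo hi 1).foldl
        (fun best i =>
          let v := PySem.List.pyGetD result i 0 + PySem.List.pyGetD suf (i - lo) 0
          match best with
          | none => some v
          | some b => if v < b then some v else some b) (none : Option Int)
      best.getD (-1)

-- ===== PRECONDITION & SPEC =====
-- Pre_ excludes exactly the inputs where A raises IndexError: y below -len(data)
-- (data[y] fails), or the scanned window reaching past result or past row y+1.
def Pre_checkonx (data : List (List Int)) (result : List Int) (x : Int) (y : Int) : Prop :=
  y < (data.length : Int) - 1 →
    (-(data.length : Int) ≤ y ∧
      (max 0 (x - 8) < min x ((((PySem.List.pyGet? data y).getD []).length : Int)) →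
        min x ((((PySem.List.pyGet? data y).getD []).length : Int)) ≤ (result.length : Int) ∧
        min (x + 1) ((((PySem.List.pyGet? data y).getD []).length : Int)) ≤
          ((((PySem.List.pyGet? data (y + 1)).getD []).length : Int))))
instance (data : List (List Int)) (result : List Int) (x : Int) (y : Int) : Decidable (Pre_checkonx data result x y) := by unfold Pre_checkonx; infer_instance

def pvWitness_checkonx : List (List Int) × List Int × Int × Int :=
  ([[1, 2, 3], [4, 5, 6]], [7, 8, 9], 2, 0)

def Spec_checkonx (data : List (List Int)) (result : List Int) (x : Int) (y : Int) (out : Int) : Prop := out = checkonx_alt data result x y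
instance (data : List (List Int)) (result : List Int) (x : Int) (y : Int) (out : Int) : Decidable (Spec_checkonx data result x y out) := by unfold Spec_checkonx; infer_instance

-- ===== CLAIM (what is proved, stated in full; the proofs are below) =====
def Claim_equal_checkonx : Prop := ∀ (data : List (List Int)) (result : List Int) (x : Int) (y : Int), Dom_checkonx data result x y → Pre_checkonx data result x y → Spec_checkonx data result x y (checkonx data result x y)

-- ===== LEMMAS AND PROOFS =====

-- the suffix-sum list B builds equals the table of suffix sums F i = Σ_{j∈[i,b)} g j, i ∈ [a, b]
theorem suf_fold_aux (g : Int → Int) (a b : Int) :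
    ∀ (n : Nat) (c : Int), a - 1 ≤ c → c < b → (c - (a - 1)).toNat = n →
      (PySem.List.pyRange c (a - 1) (-1)).foldl (fun s i => (s.headD 0 + g i) :: s)
        ((PySem.List.pyRange (c + 1) (b + 1) 1).map (fun i => ((PySem.List.pyRange i b 1).map g).sum))
      = (PySem.List.pyRange a (b + 1) 1).map (fun i => ((PySem.List.pyRange i b 1).map g).sum) := by
  intro n
  induction n with
  | zero =>
    intro c h1 h2 h3
    have hc : c = a - 1 := by omega
    subst hc
    rw [PySem.List.pyRange_neg_one_eq_nil le_rfl]
    simp only [List.foldl]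
    rw [show a - 1 + 1 = a by omega]
  | succ n ih =>
    intro c h1 h2 h3
    have hac : a - 1 < c := by omega
    rw [PySem.List.pyRange_neg_one_cons hac]
    simp only [List.foldl]
    have hinit : (PySem.List.pyRange (c + 1) (b + 1) 1).map
        (fun i => ((PySem.List.pyRange i b 1).map g).sum)
        = ((PySem.List.pyRange (c + 1) b 1).map g).sum ::
          (PySem.List.pyRange (c + 2) (b + 1) 1).map
            (fun i => ((PySem.List.pyRange i b 1).map g).sum) := by
      rw [PySem.List.pyRange_one_cons (by omega), List.map_cons,
        show c + 1 + 1 = c + 2 by omega]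
    rw [hinit]
    have hstep : (((PySem.List.pyRange (c + 1) b 1).map g).sum ::
          (PySem.List.pyRange (c + 2) (b + 1) 1).map
            (fun i => ((PySem.List.pyRange i b 1).map g).sum)).headD 0 + g c
        = ((PySem.List.pyRange c b 1).map g).sum := by
      rw [PySem.List.pyRange_one_cons (show c < b by omega), List.map_cons, List.sum_cons]
      simp [add_comm]
    rw [List.headD_cons] at hstep ⊢
    rw [hstep]
    have hcons : (PySem.List.pyRange c (b + 1) 1).map
        (fun i => ((PySem.List.pyRange i b 1).map g).sum)
        = ((PySem.List.pyRange c b 1).map g).sum ::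
          ((PySem.List.pyRange (c + 1) b 1).map g).sum ::
          (PySem.List.pyRange (c + 2) (b + 1) 1).map
            (fun i => ((PySem.List.pyRange i b 1).map g).sum) := by
      rw [PySem.List.pyRange_one_cons (show c < b + 1 by omega), List.map_cons, hinit]
    rw [← hcons]
    have := ih (c - 1) (by omega) (by omega) (by omega)
    rw [show c - 1 + 1 = c by omega] at this
    exact this

theorem suf_fold (g : Int → Int) (a b : Int) (hab : a ≤ b) :
    (PySem.List.pyRange (b - 1) (a - 1) (-1)).foldl (fun s i => (s.headD 0 + g i) :: s) [0]
      = (PySem.List.pyRange a (b + 1) 1).map (fun i => ((PySem.List.pyRange i b 1).map g).sum) := by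
  by_cases hab' : a = b
  · subst hab'
    rw [PySem.List.pyRange_neg_one_eq_nil (by omega)]
    simp only [List.foldl]
    rw [PySem.List.pyRange_one_singleton, List.map_singleton,
      PySem.List.pyRange_one_eq_nil le_rfl, List.map_nil, List.sum_nil]
  · have h := suf_fold_aux g a b (b - 1 - (a - 1)).toNat (b - 1) (by omega) (by omega) rfl
    rw [show b - 1 + 1 = b by omega] at h
    rw [PySem.List.pyRange_one_singleton, List.map_singleton,
      PySem.List.pyRange_one_eq_nil le_rfl, List.map_nil, List.sum_nil] at h
    exact h

-- B's running-minimum option fold is Python's min of the same list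
theorem optfold_min (f : Int → Int) (l : List Int) (b : Int) :
    l.foldl (fun best i => match best with
      | none => some (f i)
      | some bb => if f i < bb then some (f i) else some bb) (some b)
    = some ((l.map f).foldl min b) := by
  induction l generalizing b with
  | nil => rfl
  | cons v t ih =>
    simp only [List.foldl, List.map]
    rw [show (if f v < b then some (f v) else some b) = some (min b (f v)) by
      by_cases h : b ≤ f v
      · rw [if_neg (by omega), min_eq_left h]
      · rw [if_pos (by omega), min_eq_right (by omega)]]
    exact ih _

-- Python's min of the nonempty mapped window, as a running fold
theorem min_if_Aside (f : Int → Int) (lo hi : Int) (hlh : lo < hi) :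
    (if 0 < (((PySem.List.pyRange lo hi 1).map f).length : Int)
      then (PySem.List.min? ((PySem.List.pyRange lo hi 1).map f) (fun v => v)).getD 0 else -1)
    = ((PySem.List.pyRange (lo + 1) hi 1).map f).foldl min (f lo) := by
  have hlen : (0 : Int) < (((PySem.List.pyRange lo hi 1).map f).length : Int) := by
    rw [List.length_map, PySem.List.length_pyRange_one]
    omega
  rw [if_pos hlen, PySem.List.pyRange_one_cons hlh, List.map_cons,
    PySem.List.min?_id_cons, Option.getD_some]

-- B's None/compare running-minimum loop computes the same fold
theorem min_if_Bside (f : Int → Int) (lo hi : Int) (hlh : lo < hi) :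
    ((PySem.List.pyRange lo hi 1).foldl (fun best i =>
        match best with
        | none => some (f i)
        | some b => if f i < b then some (f i) else some b) (none : Option Int)).getD (-1)
    = ((PySem.List.pyRange (lo + 1) hi 1).map f).foldl min (f lo) := by
  rw [PySem.List.pyRange_one_cons hlh, List.foldl_cons,
    show (match (none : Option Int) with
      | none => some (f lo)
      | some b => if f lo < b then some (f lo) else some b) = some (f lo) from rfl,
    optfold_min f _ (f lo), Option.getD_some]

-- the two programs agree at the level of the window [lo, hi) with suffix end `upper`
theorem core (nxt result : List Int) (lo hi upper : Int) (hhu : hi ≤ upper) :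
    (if 0 < (((PySem.List.pyRange lo hi 1).foldl
        (fun tmp i =>
          tmp ++ [(PySem.List.pyRange (i + 1) upper 1).foldl
                    (fun act j => act + PySem.List.pyGetD nxt j 0)
                    (PySem.List.pyGetD result i 0 + PySem.List.pyGetD nxt i 0)]) []).length : Int)
      then (PySem.List.min? ((PySem.List.pyRange lo hi 1).foldl
        (fun tmp i =>
          tmp ++ [(PySem.List.pyRange (i + 1) upper 1).foldl
                    (fun act j => act + PySem.List.pyGetD nxt j 0)
                    (PySem.List.pyGetD result i 0 + PySem.List.pyGetD nxt i 0)]) []) (fun v => v)).getD 0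
      else -1)
    = (if lo ≥ hi then -1
       else
        ((PySem.List.pyRange lo hi 1).foldl
          (fun best i =>
            let v := PySem.List.pyGetD result i 0 +
              PySem.List.pyGetD ((PySem.List.pyRange (upper - 1) (lo - 1) (-1)).foldl
                (fun suf i => (suf.headD 0 + PySem.List.pyGetD nxt i 0) :: suf) [0]) (i - lo) 0
            match best with
            | none => some v
            | some b => if v < b then some v else some b) (none : Option Int)).getD (-1)) := by
  by_cases hlh : lo < hi
  · rw [if_neg (show ¬ lo ≥ hi by omega)]
    rw [PySem.List.foldl_append_singleton_eq_map, List.nil_append]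
    -- A's entries are result[i] + suffix-sum from i
    have hmapA : (PySem.List.pyRange lo hi 1).map
        (fun i => (PySem.List.pyRange (i + 1) upper 1).foldl
          (fun act j => act + PySem.List.pyGetD nxt j 0)
          (PySem.List.pyGetD result i 0 + PySem.List.pyGetD nxt i 0))
        = (PySem.List.pyRange lo hi 1).map
            (fun i => PySem.List.pyGetD result i 0 +
              ((PySem.List.pyRange i upper 1).map (fun j => PySem.List.pyGetD nxt j 0)).sum) := by
      apply List.map_congr_left
      intro i hmem
      rw [PySem.List.mem_pyRange_one] at hmem
      rw [PySem.List.foldl_add, PySem.List.pyRange_one_cons (show i < upper by omega),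
        List.map_cons, List.sum_cons]
      ring
    rw [hmapA]
    -- B's suffix list is the table of those suffix sums
    rw [suf_fold (fun j => PySem.List.pyGetD nxt j 0) lo upper (by omega)]
    -- B's lookups hit exactly those table entries
    have hB : (PySem.List.pyRange lo hi 1).foldl
        (fun best i =>
          let v := PySem.List.pyGetD result i 0 +
            PySem.List.pyGetD ((PySem.List.pyRange lo (upper + 1) 1).map
              (fun i => ((PySem.List.pyRange i upper 1).map (fun j => PySem.List.pyGetD nxt j 0)).sum))
              (i - lo) 0
          match best with
          | none => some v
          | some b => if v < b then some v else some b) (none : Option Int)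
        = (PySem.List.pyRange lo hi 1).foldl
          (fun best i =>
            match best with
            | none => some (PySem.List.pyGetD result i 0 +
                ((PySem.List.pyRange i upper 1).map (fun j => PySem.List.pyGetD nxt j 0)).sum)
            | some b => if PySem.List.pyGetD result i 0 +
                ((PySem.List.pyRange i upper 1).map (fun j => PySem.List.pyGetD nxt j 0)).sum < b
                then some (PySem.List.pyGetD result i 0 +
                  ((PySem.List.pyRange i upper 1).map (fun j => PySem.List.pyGetD nxt j 0)).sum)
                else some b) (none : Option Int) := by
      apply PySem.List.foldl_congr_mem
      intro acc i hmem
      rw [PySem.List.mem_pyRange_one] at hmem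
      rw [show i - lo = (((i - lo).toNat : Nat) : Int) by omega,
        PySem.List.pyGetD_map_pyRange_one _ lo (upper + 1) _ _ (by omega),
        show lo + (((i - lo).toNat : Nat) : Int) = i by omega]
    rw [hB]
    exact (min_if_Aside (fun i => PySem.List.pyGetD result i 0 +
        ((PySem.List.pyRange i upper 1).map (fun j => PySem.List.pyGetD nxt j 0)).sum) lo hi hlh).trans
      (min_if_Bside (fun i => PySem.List.pyGetD result i 0 +
        ((PySem.List.pyRange i upper 1).map (fun j => PySem.List.pyGetD nxt j 0)).sum) lo hi hlh).symm
  · rw [PySem.List.pyRange_one_eq_nil (show hi ≤ lo by omega),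
      if_pos (show lo ≥ hi by omega)]
    simp

-- ===== VERDICT (by name: the statement is the Claim_ definition above) =====
theorem checkonx_spec : Claim_equal_checkonx := by
  intro data result x y _ _
  unfold Spec_checkonx checkonx checkonx_alt
  by_cases hy : y < (data.length : Int) - 1
  · rw [if_pos hy, if_neg (show ¬ y ≥ (data.length : Int) - 1 by omega)]
    exact core ((PySem.List.pyGet? data (y + 1)).getD []) result (max 0 (x - 8))
      (min x ((((PySem.List.pyGet? data y).getD []).length : Int)))
      (min (x + 1) ((((PySem.List.pyGet? data y).getD []).length : Int)))
      (by omega)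
  · rw [if_neg hy, if_pos (show y ≥ (data.length : Int) - 1 by omega)]
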